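-- pv_equiv track=rewrite | github.com/jenych0314/Python | 텍본 수정 프로그램/20210906_ver10.py | close_expression_idx_check
-- ===== SOURCE A (Python) =====
-- close_expression = ['.', '?', '!']
--
-- special_character = '~!@#$%^&*-=_+./:;|\\|'
--
-- def close_expression_idx_check(string):
--     idx_dict = {}
--     temp = []
--
--     for i in range(len(string)):
--         if string[i] in close_expression:
--             idx_dict[i] = i
--             temp.append(i)
--             for j in range(len(string) - i):
--                 if any(s in string[i+j] for s in special_character) or (string[i+j] in close_expression):
--                     idx_dict[i] = i+j
--                 else:
--                     break
--     return list(idx_dict.items())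
-- ===== SOURCE B (Python) =====
-- close_expression = ['.', '?', '!']
--
-- special_character = '~!@#$%^&*-=_+./:;|\\|'
--
-- def close_expression_idx_check(string):
--     # One right-to-left pass keeping the end of the current special-char run
--     # in a scalar; one append per close-expression position.
--     special = frozenset(special_character) | frozenset(close_expression)
--     enders = frozenset(close_expression)
--     out = []
--     run_end = -1
--     prev_special = False
--     i = len(string)
--     for c in reversed(string):
--         i -= 1
--         if c in special:
--             if not prev_special:
--                 run_end = i
--             prev_special = True
--         else:
--             run_end = -1
--             prev_special = False
--         if c in enders:
--             out.append((i, run_end))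
--     out.reverse()
--     return out
-- ===== Notes on version B (the rewrite author's own statement) =====
-- stated objective: alternative
-- what changed: A rescans the special-character run from every sentence-ender position (nested loop, dict entry rewritten per step); B makes one right-to-left pass keeping the current run's end index in a scalar and emits one pair per close-expression position.
import Mathlib
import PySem

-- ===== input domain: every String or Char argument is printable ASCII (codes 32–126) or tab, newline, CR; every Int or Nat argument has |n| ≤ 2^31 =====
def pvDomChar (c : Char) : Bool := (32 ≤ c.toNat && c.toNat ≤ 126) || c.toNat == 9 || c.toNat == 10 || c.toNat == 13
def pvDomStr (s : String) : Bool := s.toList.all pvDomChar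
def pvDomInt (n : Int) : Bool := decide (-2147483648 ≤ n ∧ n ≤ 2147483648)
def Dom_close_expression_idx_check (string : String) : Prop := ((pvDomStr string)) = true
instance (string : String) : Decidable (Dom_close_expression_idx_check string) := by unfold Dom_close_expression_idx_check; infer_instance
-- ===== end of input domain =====

-- B replaces A's per-ender rescans of the special-character run by one
-- right-to-left pass keeping the current run's end in a scalar (objective: alternative).

-- ===== PORT A =====
-- close_expression = ['.', '?', '!']
def pvCloseExpr : List Char := ['.', '?', '!']
-- special_character = '~!@#$%^&*-=_+./:;|\\|'
def pvSpecialChars : List Char := ['~', '!', '@', '#', '$', '%', '^', '&', '*', '-', '=', '_', '+', '.', '/', ':', ';', '|', '\\', '|']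

-- "any(s in string[i+j] for s in special_character) or (string[i+j] in close_expression)"
-- (string[i+j] is a single char, so 's in string[i+j]' is s == that char)
def pvCondA (c : Char) : Bool := pvSpecialChars.contains c || pvCloseExpr.contains c

-- inner loop "for j in range(len(string)-i): … else: break", scanning the suffix s[i:]
def pvInnerA (i : Int) : List Char → Int → PySem.Dict Int Int → PySem.Dict Int Int
  | [], _, d => d
  | c :: rest, j, d =>
      if pvCondA c then pvInnerA i rest (j + 1) (d.insert i (i + j)) else d

-- outer loop "for i in range(len(string)): if string[i] in close_expression: …"
-- (temp is appended to but never read for the result; it is omitted)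
def pvOuterA : List Char → Int → PySem.Dict Int Int → PySem.Dict Int Int
  | [], _, d => d
  | c :: rest, i, d =>
      pvOuterA rest (i + 1)
        (if pvCloseExpr.contains c then pvInnerA i (c :: rest) 0 (d.insert i i) else d)

def close_expression_idx_check (string : String) : List (Int × Int) :=
  (pvOuterA string.toList 0 PySem.Dict.empty).items

-- ===== PORT B =====
-- "special = frozenset(special_character) | frozenset(close_expression)"
def pvSpecialSet : List Char := PySem.Set.union (PySem.Set.ofList pvSpecialChars) (PySem.Set.ofList pvCloseExpr)
-- "enders = frozenset(close_expression)"
def pvEndersSet : List Char := PySem.Set.ofList pvCloseExpr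
def pvSpecialB (c : Char) : Bool := pvSpecialSet.contains c
def pvEndersB (c : Char) : Bool := pvEndersSet.contains c

-- the backward loop "for i in range(len(string)-1, -1, -1): …"; state (prev_special, run_end, out);
-- recursion from the right = the backward scan; consing = append-then-reverse
def pvLoopB : List Char → Int → Bool × Int × List (Int × Int)
  | [], _ => (false, -1, [])
  | c :: rest, i =>
      let st := pvLoopB rest (i + 1)         -- st = (prev_special, run_end, out)
      let sp := pvSpecialB c
      let re := if pvSpecialB c then (if st.1 then st.2.1 else i) else -1
      (sp, re, if pvEndersB c then (i, re) :: st.2.2 else st.2.2)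

def close_expression_idx_check_alt (string : String) : List (Int × Int) :=
  (pvLoopB string.toList 0).2.2

-- ===== PRECONDITION & SPEC =====
def Spec_close_expression_idx_check (string : String) (out : List (Int × Int)) : Prop := out = close_expression_idx_check_alt string
instance (string : String) (out : List (Int × Int)) : Decidable (Spec_close_expression_idx_check string out) := by unfold Spec_close_expression_idx_check; infer_instance

-- ===== CLAIM (what is proved, stated in full; the proofs are below) =====
def Claim_equal_close_expression_idx_check : Prop := ∀ (string : String), Dom_close_expression_idx_check string → Spec_close_expression_idx_check string (close_expression_idx_check string)

-- ===== LEMMAS AND PROOFS =====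

-- the common specification: for each close-expression position i (absolute index),
-- the pair (i, end of the run of pvCondA-characters starting at i)
def pvSpecList : List Char → Int → List (Int × Int)
  | [], _ => []
  | c :: rest, i =>
      (if pvCloseExpr.contains c then [(i, i + (((c :: rest).takeWhile pvCondA).length : Int) - 1)] else [])
        ++ pvSpecList rest (i + 1)

lemma pvClose_imp_cond {c : Char} (h : pvCloseExpr.contains c = true) : pvCondA c = true := by
  simp only [pvCondA, Bool.or_eq_true]
  exact Or.inr h

-- the two frozensets test exactly the same characters as A's membership chains
lemma pvSpecialB_eq (c : Char) : pvSpecialB c = pvCondA c := by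
  have h : pvSpecialSet = ['~', '!', '@', '#', '$', '%', '^', '&', '*', '-', '=', '_', '+', '.', '/', ':', ';', '|', '\\', '?'] := by decide
  rw [pvSpecialB, h, pvCondA, Bool.eq_iff_iff]
  simp only [List.contains_eq_mem, pvSpecialChars, pvCloseExpr, List.mem_cons,
    List.not_mem_nil, or_false, Bool.or_eq_true, decide_eq_true_eq]
  tauto

lemma pvEndersB_eq (c : Char) : pvEndersB c = pvCloseExpr.contains c := by
  rw [pvEndersB, show pvEndersSet = pvCloseExpr from by decide]

lemma pvInnerA_eq (cs : List Char) : ∀ (i j : Int) (d : PySem.Dict Int Int),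
    pvInnerA i cs j d =
      if (cs.takeWhile pvCondA).length = 0 then d
      else d.insert i (i + j + ((cs.takeWhile pvCondA).length : Int) - 1) := by
  induction cs with
  | nil => intro i j d; simp [pvInnerA]
  | cons c rest ih =>
    intro i j d
    by_cases hc : pvCondA c = true
    · rw [pvInnerA, if_pos hc, ih, List.takeWhile_cons_of_pos hc]
      by_cases h0 : (rest.takeWhile pvCondA).length = 0
      · simp [h0]
      · rw [if_neg h0, if_neg (by simp), PySem.Dict.insert_insert_self]
        congr 1
        simp only [List.length_cons]
        push_cast
        ring
    · rw [pvInnerA, if_neg hc, List.takeWhile_cons_of_neg (by simpa using hc)]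
      simp

def pvHeadCond : List Char → Bool
  | [] => false
  | c :: _ => pvCondA c

lemma pvLoopB_eq (cs : List Char) : ∀ i : Int,
    pvLoopB cs i = (pvHeadCond cs,
      (if pvHeadCond cs then i + ((cs.takeWhile pvCondA).length : Int) - 1 else -1),
      pvSpecList cs i) := by
  induction cs with
  | nil => intro i; simp [pvLoopB, pvHeadCond, pvSpecList]
  | cons c rest ih =>
    intro i
    have h0 : pvHeadCond rest = false → (rest.takeWhile pvCondA).length = 0 := by
      cases rest with
      | nil => simp
      | cons c' rest' =>
        intro h
        rw [List.takeWhile_cons_of_neg (by simp [pvHeadCond] at h; simp [h])]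
        rfl
    rw [pvLoopB, ih (i + 1)]
    by_cases hc : pvCondA c = true
    · have hsp : pvSpecialB c = true := by rw [pvSpecialB_eq]; exact hc
      rw [List.takeWhile_cons_of_pos hc]
      have hre : (if pvSpecialB c = true then
            (if pvHeadCond rest = true then
              (if pvHeadCond rest = true then i + 1 + ((rest.takeWhile pvCondA).length : Int) - 1 else -1)
            else i) else -1)
          = i + (((c :: rest.takeWhile pvCondA)).length : Int) - 1 := by
        rw [if_pos hsp]
        cases hr : pvHeadCond rest with
        | true => simp only [if_pos, List.length_cons]; push_cast; ring
        | false => rw [if_neg (by simp), List.length_cons, h0 hr]; push_cast; ring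
      simp only [hre]
      have hh : pvHeadCond (c :: rest) = true := hc
      simp only [hh, hsp, pvSpecList, if_true]
      rw [List.takeWhile_cons_of_pos hc]
      by_cases hb : c ∈ pvCloseExpr <;> simp [pvEndersB_eq, hb, List.length_cons]
    · have hsp : pvSpecialB c = false := by rw [pvSpecialB_eq]; simpa using hc
      have hcl : pvCloseExpr.contains c = false := by
        rcases hb : pvCloseExpr.contains c with _ | _
        · rfl
        · exact absurd (pvClose_imp_cond hb) hc
      have hh : pvHeadCond (c :: rest) = false := by simpa [pvHeadCond] using hc
      have hm : c ∉ pvCloseExpr := by simpa using hcl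
      simp [pvEndersB_eq, hsp, hm, hh, pvSpecList]

lemma pvOuterA_eq (cs : List Char) : ∀ (i : Int) (d : PySem.Dict Int Int),
    (∀ k ∈ d.keys, k < i) →
    (pvOuterA cs i d).items = d.items ++ pvSpecList cs i := by
  induction cs with
  | nil => intro i d _; simp [pvOuterA, pvSpecList]
  | cons c rest ih =>
    intro i d hlt
    rw [pvOuterA, pvSpecList]
    by_cases hcl : pvCloseExpr.contains c = true
    · have hc : pvCondA c = true := pvClose_imp_cond hcl
      rw [if_pos hcl, pvInnerA_eq,
        if_neg (by rw [List.takeWhile_cons_of_pos hc]; simp),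
        PySem.Dict.insert_insert_self]
      have hni : d.contains i = false := by
        rcases hb : d.contains i with _ | _
        · rfl
        · have : i ∈ d.keys := (PySem.Dict.contains_iff_mem_keys d i).mp hb
          exact absurd (hlt i this) (lt_irrefl i)
      rw [ih (i + 1) _ (by
        intro k hk
        rcases (PySem.Dict.mem_keys_insert _ _ _ _).mp hk with h | h
        · omega
        · have := hlt k h; omega),
        PySem.Dict.items_insert, hni]
      simp only [Bool.false_eq_true, if_false, List.append_assoc, List.singleton_append]
      have hm : c ∈ pvCloseExpr := by simpa using hcl
      simp [hm]
    · rw [if_neg hcl, ih (i + 1) d (fun k hk => by have := hlt k hk; omega)]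
      simp [show c ∉ pvCloseExpr by simpa using hcl]

-- ===== VERDICT (by name: the statement is the Claim_ definition above) =====
theorem close_expression_idx_check_spec : Claim_equal_close_expression_idx_check := by
  intro s _
  unfold Spec_close_expression_idx_check close_expression_idx_check close_expression_idx_check_alt
  rw [pvLoopB_eq, pvOuterA_eq s.toList 0 PySem.Dict.empty (by simp [PySem.Dict.keys_empty])]
  simp [PySem.Dict.empty]
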